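-- pv_equiv track=rewrite | github.com/Yrviocnhnie/Bandit_SFM | recommendation_agents/recommendation_agents/trainer.py | _count_interleaved_splits
-- ===== SOURCE A (Python) =====
-- def _count_interleaved_splits(total_rows: int, train_window: int, eval_window: int) -> tuple[int, int]:
--     cycle = train_window + eval_window
--     train_rows = 0
--     eval_rows = 0
--     for index in range(total_rows):
--         if index % cycle < train_window:
--             train_rows += 1
--         else:
--             eval_rows += 1
--     return train_rows, eval_rows
-- ===== SOURCE B (Python) =====
-- def _count_interleaved_splits(total_rows: int, train_window: int, eval_window: int) -> tuple[int, int]: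
--     cycle = train_window + eval_window
--     rows = max(total_rows, 0)
--     if rows == 0:
--         return 0, 0
--     full, rem = divmod(rows, cycle)
--     per_cycle = min(max(train_window, 0), cycle)
--     train_rows = full * per_cycle + min(rem, per_cycle)
--     return train_rows, rows - train_rows
-- ===== Notes on version B (the rewrite author's own statement) =====
-- stated objective: faster
-- what changed: Replaced the O(total_rows) loop over every index with O(1) closed-form arithmetic: full cycles contribute full*clamp(train_window,0,cycle) train rows and the remainder contributes min(rem, clamp(train_window,0,cycle)).
-- outside the precondition, e.g. on _count_interleaved_splits(3, -1, -1): A returns (0, 3), B returns (2, 1)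
import Mathlib
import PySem

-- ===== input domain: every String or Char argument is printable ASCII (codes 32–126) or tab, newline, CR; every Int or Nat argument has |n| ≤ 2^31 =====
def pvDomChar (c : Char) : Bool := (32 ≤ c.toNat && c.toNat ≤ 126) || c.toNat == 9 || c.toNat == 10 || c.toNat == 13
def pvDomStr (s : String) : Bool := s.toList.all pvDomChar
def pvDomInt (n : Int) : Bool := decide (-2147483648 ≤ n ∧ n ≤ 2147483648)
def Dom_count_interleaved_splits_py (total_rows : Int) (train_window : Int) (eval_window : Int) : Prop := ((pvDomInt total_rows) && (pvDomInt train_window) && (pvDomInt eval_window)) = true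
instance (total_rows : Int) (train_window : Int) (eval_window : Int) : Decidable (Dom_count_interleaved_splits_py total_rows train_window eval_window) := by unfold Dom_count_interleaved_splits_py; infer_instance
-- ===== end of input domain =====

-- B replaces A's O(total_rows) per-index loop with O(1) closed-form arithmetic (full cycles + remainder).

-- ===== PORT A =====
def count_interleaved_splits_py (total_rows : Int) (train_window : Int) (eval_window : Int) : Int × Int :=
  let cycle := train_window + eval_window
  (PySem.List.pyRange 0 total_rows 1).foldl
    (fun (s : Int × Int) index =>
      if PySem.Int.mod index cycle < train_window then (s.1 + 1, s.2) else (s.1, s.2 + 1))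
    (0, 0)

-- ===== PORT B =====
def count_interleaved_splits_py_alt (total_rows : Int) (train_window : Int) (eval_window : Int) : Int × Int :=
  let cycle := train_window + eval_window
  let rows := max total_rows 0
  if rows == 0 then (0, 0)
  else
    match PySem.Int.divmod? rows cycle with
    | none => (0, 0)  -- Python B raises ZeroDivisionError here (cycle = 0); outside Pre_
    | some (full, rem) =>
      let per_cycle := min (max train_window 0) cycle
      let train_rows := full * per_cycle + min rem per_cycle
      (train_rows, rows - train_rows)

-- ===== PRECONDITION & SPEC =====
-- Pre_ excludes positive total_rows with non-positive cycle (train_window + eval_window):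
-- with cycle = 0 both A and B raise ZeroDivisionError; with negative cycle (negative window
-- sum, outside the function's natural domain) A's floor-mod residues are an implementation
-- artefact and B's closed form does not match them.
def Pre_count_interleaved_splits_py (total_rows : Int) (train_window : Int) (eval_window : Int) : Prop :=
  total_rows ≤ 0 ∨ 0 < train_window + eval_window
instance (total_rows : Int) (train_window : Int) (eval_window : Int) : Decidable (Pre_count_interleaved_splits_py total_rows train_window eval_window) := by unfold Pre_count_interleaved_splits_py; infer_instance

def pvWitness_count_interleaved_splits_py : Int × Int × Int := (7, 2, 3)

def Spec_count_interleaved_splits_py (total_rows : Int) (train_window : Int) (eval_window : Int) (out : Int × Int) : Prop := out = count_interleaved_splits_py_alt total_rows train_window eval_window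
instance (total_rows : Int) (train_window : Int) (eval_window : Int) (out : Int × Int) : Decidable (Spec_count_interleaved_splits_py total_rows train_window eval_window out) := by unfold Spec_count_interleaved_splits_py; infer_instance

-- ===== CLAIM (what is proved, stated in full; the proofs are below) =====
def Claim_equal_count_interleaved_splits_py : Prop := ∀ (total_rows : Int) (train_window : Int) (eval_window : Int), Dom_count_interleaved_splits_py total_rows train_window eval_window → Pre_count_interleaved_splits_py total_rows train_window eval_window → Spec_count_interleaved_splits_py total_rows train_window eval_window (count_interleaved_splits_py total_rows train_window eval_window)

-- ===== LEMMAS AND PROOFS =====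

-- closed-form train count for the first n indices (cycle > 0), stated with Lean's ediv/emod
def pvTrainClosed (tw cycle n : Int) : Int :=
  n / cycle * min (max tw 0) cycle + min (n % cycle) (min (max tw 0) cycle)

lemma pvTrainClosed_zero (tw cycle : Int) (hc : 0 < cycle) : pvTrainClosed tw cycle 0 = 0 := by
  have hper : 0 ≤ min (max tw 0) cycle := le_min (le_max_right _ _) hc.le
  simp [pvTrainClosed]
  omega

lemma pvTrainClosed_step (tw cycle n : Int) (hc : 0 < cycle) (_hn : 0 ≤ n) :
    pvTrainClosed tw cycle (n + 1)
      = pvTrainClosed tw cycle n + (if n % cycle < tw then 1 else 0) := by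
  set per := min (max tw 0) cycle with hper
  have hper0 : 0 ≤ per := le_min (le_max_right _ _) hc.le
  have hperc : per ≤ cycle := min_le_right _ _
  set q := n / cycle with hq
  set r := n % cycle with hr
  have hdecomp : n = cycle * q + r := by rw [hq, hr]; have := Int.mul_ediv_add_emod n cycle; omega
  have hr0 : 0 ≤ r := Int.emod_nonneg n hc.ne'
  have hrc : r < cycle := Int.emod_lt_of_pos n hc
  by_cases hlt : r + 1 < cycle
  · have hdiv : (n + 1) / cycle = q := by
      have : n + 1 = (r + 1) + cycle * q := by omega
      rw [this, Int.add_mul_ediv_left _ _ hc.ne', Int.ediv_eq_zero_of_lt (by omega) hlt]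
      omega
    have hmod : (n + 1) % cycle = r + 1 := by
      have : n + 1 = (r + 1) + cycle * q := by omega
      rw [this, Int.add_mul_emod_self_left, Int.emod_eq_of_lt (by omega) hlt]
    unfold pvTrainClosed
    rw [hdiv, hmod, ← hper, ← hq, ← hr]
    have htw : r < tw ↔ r < per := by
      constructor
      · intro h; exact lt_min (lt_of_lt_of_le h (by omega)) hrc
      · intro h; exact lt_of_lt_of_le h (by omega)
    by_cases h : r < tw
    · have h' : r < per := htw.mp h
      simp only [if_pos h]
      omega
    · have h' : ¬ r < per := fun hh => h (htw.mpr hh)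
      simp only [if_neg h]
      omega
  · -- r + 1 = cycle : the next index closes a full cycle
    have hrq : r = cycle - 1 := by omega
    have hmul : cycle * (q + 1) = cycle * q + cycle := by ring
    have hfull : n + 1 = cycle * (q + 1) := by omega
    have hdiv : (n + 1) / cycle = q + 1 := by
      rw [hfull, Int.mul_ediv_cancel_left _ hc.ne']
    have hmod : (n + 1) % cycle = 0 := by
      rw [hfull, Int.mul_emod_right]
    unfold pvTrainClosed
    rw [hdiv, hmod, ← hper, ← hq, ← hr]
    have hexp : (q + 1) * per = q * per + per := by ring
    rw [hexp]
    have htw : r < tw ↔ r < per := by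
      constructor
      · intro h; exact lt_min (lt_of_lt_of_le h (by omega)) hrc
      · intro h; exact lt_of_lt_of_le h (by omega)
    by_cases h : r < tw
    · have h' : r < per := htw.mp h
      simp only [if_pos h]
      omega
    · have h' : ¬ r < per := fun hh => h (htw.mpr hh)
      simp only [if_neg h]
      omega

-- the loop of A computes the closed form, for cycle > 0
lemma pv_loopA (tw ew : Int) (hc : 0 < tw + ew) (n : Nat) :
    (PySem.List.pyRange 0 (n : Int) 1).foldl
      (fun (s : Int × Int) index =>
        if PySem.Int.mod index (tw + ew) < tw then (s.1 + 1, s.2) else (s.1, s.2 + 1))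
      (0, 0)
    = (pvTrainClosed tw (tw + ew) n, (n : Int) - pvTrainClosed tw (tw + ew) n) := by
  induction n with
  | zero =>
    rw [PySem.List.pyRange_one_eq_nil (by norm_num)]
    simp [pvTrainClosed_zero tw (tw + ew) hc]
  | succ k ih =>
    have hcast : ((k + 1 : Nat) : Int) = (k : Int) + 1 := by push_cast; ring
    rw [hcast, PySem.List.pyRange_one_succ_right (by positivity), List.foldl_append, ih]
    simp only [List.foldl_cons, List.foldl_nil]
    rw [PySem.Int.mod_eq_emod_of_pos hc,
        pvTrainClosed_step tw (tw + ew) k hc (by positivity)]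
    by_cases h : (k : Int) % (tw + ew) < tw
    · simp only [if_pos h, Prod.mk.injEq]
      exact ⟨trivial, by ring⟩
    · simp only [if_neg h, Prod.mk.injEq]
      exact ⟨(add_zero _).symm, by ring⟩

-- ===== VERDICT (by name: the statement is the Claim_ definition above) =====
theorem count_interleaved_splits_py_spec : Claim_equal_count_interleaved_splits_py := by
  intro total_rows tw ew _ hpre
  unfold Spec_count_interleaved_splits_py count_interleaved_splits_py count_interleaved_splits_py_alt
  by_cases htot : total_rows ≤ 0
  · rw [PySem.List.pyRange_one_eq_nil htot]
    have hmax : max total_rows 0 = 0 := max_eq_right htot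
    simp [hmax]
  · have hc : 0 < tw + ew := by
      rcases hpre with h | h
      · omega
      · exact h
    have htot' : 0 < total_rows := by omega
    have hmax : max total_rows 0 = total_rows := max_eq_left htot'.le
    have hne : (max total_rows 0 == 0) = false := by
      rw [hmax]; exact beq_eq_false_iff_ne.mpr htot'.ne'
    have hn : total_rows = ((total_rows.toNat : Nat) : Int) := by omega
    simp only [hne, Bool.false_eq_true, if_false]
    have hdm : PySem.Int.divmod? (max total_rows 0) (tw + ew)
        = some ((max total_rows 0) / (tw + ew), (max total_rows 0) % (tw + ew)) := by
      simp only [PySem.Int.divmod?, hc.ne', if_false]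
      rw [show ((max total_rows 0).fdiv (tw + ew)) = PySem.Int.floordiv (max total_rows 0) (tw + ew) from rfl,
          show ((max total_rows 0).fmod (tw + ew)) = PySem.Int.mod (max total_rows 0) (tw + ew) from rfl,
          PySem.Int.floordiv_eq_ediv_of_pos hc, PySem.Int.mod_eq_emod_of_pos hc]
    rw [hmax] at hdm ⊢
    have hloop := pv_loopA tw ew hc total_rows.toNat
    rw [← hn] at hloop
    rw [hloop, hdm]
    simp only [pvTrainClosed]
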